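-- pv_equiv track=rewrite | github.com/sschepis/tinyaleph-py | apps/llm_fusion/train.py | _assistant_only_mask_from_offsets
-- ===== SOURCE A (Python) =====
-- from typing import Any, Callable, Dict, List, Optional, Tuple, Union
--
-- def _assistant_only_mask_from_offsets(
--     text: str,
--     offsets: List[List[int]],
--     assistant_start: str,
--     assistant_end: str,
-- ) -> List[int]:
--     """Build a mask that keeps only assistant spans using character offsets."""
--     if not assistant_start or not assistant_end:
--         return [0] * len(offsets)
--
--     spans = []
--     search_from = 0
--     while True:
--         start_idx = text.find(assistant_start, search_from)
--         if start_idx == -1: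
--             break
--         content_start = start_idx + len(assistant_start)
--         end_idx = text.find(assistant_end, content_start)
--         if end_idx == -1:
--             end_idx = len(text)
--         spans.append((content_start, end_idx))
--         search_from = end_idx + len(assistant_end)
--
--     if not spans:
--         return [0] * len(offsets)
--
--     mask = [0] * len(offsets)
--     for i, (start, end) in enumerate(offsets):
--         if start == end:
--             continue
--         for span_start, span_end in spans:
--             if start >= span_start and end <= span_end:
--                 mask[i] = 1
--                 break
--     return mask
-- ===== SOURCE B (Python) =====
-- from bisect import bisect_right
--
-- def _assistant_only_mask_from_offsets(text, offsets, assistant_start, assistant_end):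
--     """Mask via one bisect per offset on the sorted, disjoint span starts."""
--     if not assistant_start or not assistant_end:
--         return [0] * len(offsets)
--
--     starts = []
--     ends = []
--     pos = text.find(assistant_start)
--     while pos != -1:
--         s = pos + len(assistant_start)
--         e = text.find(assistant_end, s)
--         if e == -1:
--             e = len(text)
--         starts.append(s)
--         ends.append(e)
--         pos = text.find(assistant_start, e + len(assistant_end))
--
--     if not starts:
--         return [0] * len(offsets)
--
--     # spans are disjoint and sorted, so the only candidate span for (start, end)
--     # is the one with the greatest span_start <= start.
--     br = bisect_right
--     return [
--         1 if start != end and (j := br(starts, start)) and end <= ends[j - 1] else 0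
--         for start, end in offsets
--     ]
-- ===== Notes on version B (the rewrite author's own statement) =====
-- stated objective: alternative
-- what changed: A tests each offset against every collected span (linear scan with break); B collects the same spans once, then for each offset does a single bisect_right on the sorted, disjoint span starts and checks only that one candidate span.
import Mathlib
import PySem

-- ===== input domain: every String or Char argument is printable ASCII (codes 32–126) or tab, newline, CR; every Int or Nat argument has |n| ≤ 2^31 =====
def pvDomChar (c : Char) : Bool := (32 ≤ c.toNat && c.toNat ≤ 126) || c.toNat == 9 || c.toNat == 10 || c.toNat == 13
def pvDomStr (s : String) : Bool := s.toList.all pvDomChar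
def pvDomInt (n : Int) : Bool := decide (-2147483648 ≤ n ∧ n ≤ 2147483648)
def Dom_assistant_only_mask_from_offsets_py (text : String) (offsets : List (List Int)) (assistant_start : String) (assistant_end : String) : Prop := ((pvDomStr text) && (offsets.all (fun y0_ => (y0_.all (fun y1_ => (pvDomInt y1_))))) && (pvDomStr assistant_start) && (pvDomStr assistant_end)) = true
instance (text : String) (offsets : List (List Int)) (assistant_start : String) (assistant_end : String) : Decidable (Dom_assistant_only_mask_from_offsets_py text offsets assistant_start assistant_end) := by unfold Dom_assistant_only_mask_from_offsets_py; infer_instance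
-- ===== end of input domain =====

-- B replaces A's per-offset linear scan over the spans by one bisect_right on the span starts
-- (the spans A collects are provably disjoint and sorted), a different containment-test algorithm.

-- ===== PORT A =====
-- A's `while True` span-collection loop; fuel = len(text)+2 bounds the iterations
-- (each successful find moves search_from strictly forward), so the fuel never runs out.
def pvSpansA (t as_ ae : List Char) : Nat → Int → List (Int × Int) → List (Int × Int)
  | 0, _, acc => acc
  | fuel + 1, search_from, acc =>
    let start_idx := PySem.Chars.findFrom t as_ search_from
    if start_idx = -1 then acc
    else
      let content_start := start_idx + (as_.length : Int)
      let end_idx0 := PySem.Chars.findFrom t ae content_start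
      let end_idx := if end_idx0 = -1 then (t.length : Int) else end_idx0
      pvSpansA t as_ ae fuel (end_idx + (ae.length : Int)) (acc ++ [(content_start, end_idx)])

-- A's inner `for span_start, span_end in spans: … break` loop
def pvScanA : List (Int × Int) → Int → Int → Int
  | [], _, _ => 0
  | (span_start, span_end) :: rest, start, end_ =>
    if start ≥ span_start ∧ end_ ≤ span_end then 1 else pvScanA rest start end_

-- one row of A's mask loop (`start == end` skip, then the scan with break)
def pvRowA (spans : List (Int × Int)) (o : List Int) : Int :=
  match o with
  | [start, end_] => if start = end_ then 0 else pvScanA spans start end_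
  | _ => 0  -- Python raises ValueError on a non-pair row; such inputs are outside Pre_

def assistant_only_mask_from_offsets_py (text : String) (offsets : List (List Int)) (assistant_start : String) (assistant_end : String) : List Int :=
  if assistant_start = "" ∨ assistant_end = "" then List.replicate offsets.length 0
  else
    let t := text.toList
    let spans := pvSpansA t assistant_start.toList assistant_end.toList (t.length + 2) 0 []
    if spans = [] then List.replicate offsets.length 0
    else
      offsets.map (pvRowA spans)

-- ===== PORT B =====
-- Source B's span loop: `pos` is the most recent find result; starts/ends built front-to-back
def pvSpansB (t as_ ae : List Char) : Nat → Int → List Int × List Int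
  | 0, _ => ([], [])
  | fuel + 1, pos =>
    if pos = -1 then ([], [])
    else
      let s := pos + (as_.length : Int)
      let e0 := PySem.Chars.findFrom t ae s
      let e := if e0 = -1 then (t.length : Int) else e0
      let rest := pvSpansB t as_ ae fuel (PySem.Chars.findFrom t as_ (e + (ae.length : Int)))
      (s :: rest.1, e :: rest.2)

-- one row of Source B's mask loop: bisect_right, then the single candidate-span test
def pvRowB (starts ends : List Int) (o : List Int) : Int :=
  match o with
  | [start, end_] =>
    let j := PySem.List.bisectRight starts start
    if start ≠ end_ ∧ 1 ≤ j ∧ end_ ≤ ends.getD (j - 1) 0 then 1 else 0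
  | _ => 0  -- Python raises ValueError on a non-pair row; such inputs are outside Pre_

def assistant_only_mask_from_offsets_py_alt (text : String) (offsets : List (List Int)) (assistant_start : String) (assistant_end : String) : List Int :=
  if assistant_start = "" ∨ assistant_end = "" then List.replicate offsets.length 0
  else
    let t := text.toList
    let se := pvSpansB t assistant_start.toList assistant_end.toList (t.length + 2)
                (PySem.Chars.findFrom t assistant_start.toList 0)
    if se.1 = [] then List.replicate offsets.length 0
    else
      offsets.map (pvRowB se.1 se.2)

-- ===== PRECONDITION & SPEC =====
-- Pre_ excludes exactly the inputs where Python A raises ValueError: some offset row is not a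
-- pair AND the unpacking loop is actually reached (both markers nonempty and assistant_start
-- occurs in text). Everywhere else A returns normally.
def Pre_assistant_only_mask_from_offsets_py (text : String) (offsets : List (List Int)) (assistant_start : String) (assistant_end : String) : Prop :=
  assistant_start = "" ∨ assistant_end = "" ∨ PySem.Str.isIn assistant_start text = false ∨ ∀ o ∈ offsets, o.length = 2
instance (text : String) (offsets : List (List Int)) (assistant_start : String) (assistant_end : String) : Decidable (Pre_assistant_only_mask_from_offsets_py text offsets assistant_start assistant_end) := by unfold Pre_assistant_only_mask_from_offsets_py; infer_instance

def pvWitness_assistant_only_mask_from_offsets_py : String × List (List Int) × String × String :=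
  ("q: hi <s>yes<e> q: go <s>ok", [[0, 2], [9, 12], [10, 30], [25, 27]], "<s>", "<e>")

def Spec_assistant_only_mask_from_offsets_py (text : String) (offsets : List (List Int)) (assistant_start : String) (assistant_end : String) (out : List Int) : Prop := out = assistant_only_mask_from_offsets_py_alt text offsets assistant_start assistant_end
instance (text : String) (offsets : List (List Int)) (assistant_start : String) (assistant_end : String) (out : List Int) : Decidable (Spec_assistant_only_mask_from_offsets_py text offsets assistant_start assistant_end out) := by unfold Spec_assistant_only_mask_from_offsets_py; infer_instance

-- ===== CLAIM (what is proved, stated in full; the proofs are below) =====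
def Claim_equal_assistant_only_mask_from_offsets_py : Prop := ∀ (text : String) (offsets : List (List Int)) (assistant_start : String) (assistant_end : String), Dom_assistant_only_mask_from_offsets_py text offsets assistant_start assistant_end → Pre_assistant_only_mask_from_offsets_py text offsets assistant_start assistant_end → Spec_assistant_only_mask_from_offsets_py text offsets assistant_start assistant_end (assistant_only_mask_from_offsets_py text offsets assistant_start assistant_end)

-- ===== LEMMAS AND PROOFS =====

-- cons-style (non-accumulator) form of A's span loop, for the proofs only
def pvSpansList (t as_ ae : List Char) : Nat → Int → List (Int × Int)
  | 0, _ => []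
  | fuel + 1, sf =>
    let si := PySem.Chars.findFrom t as_ sf
    if si = -1 then []
    else
      let cs := si + (as_.length : Int)
      let e0 := PySem.Chars.findFrom t ae cs
      let e := if e0 = -1 then (t.length : Int) else e0
      (cs, e) :: pvSpansList t as_ ae fuel (e + (ae.length : Int))

-- the spans are ordered: each span lies at or after `lo`, has start ≤ end, the next starts after its end
def pvGoodFrom : Int → List (Int × Int) → Prop
  | _, [] => True
  | lo, (s, e) :: rest => lo ≤ s ∧ s ≤ e ∧ pvGoodFrom (e + 1) rest

lemma pvSpansA_eq (t as_ ae : List Char) (fuel : Nat) (sf : Int) (acc : List (Int × Int)) :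
    pvSpansA t as_ ae fuel sf acc = acc ++ pvSpansList t as_ ae fuel sf := by
  induction fuel generalizing sf acc with
  | zero => simp [pvSpansA, pvSpansList]
  | succ n ih =>
    simp only [pvSpansA, pvSpansList]
    split
    · simp
    · rw [ih]; simp

lemma pvSpansB_eq (t as_ ae : List Char) (fuel : Nat) (sf : Int) :
    pvSpansB t as_ ae fuel (PySem.Chars.findFrom t as_ sf) =
      ((pvSpansList t as_ ae fuel sf).map Prod.fst, (pvSpansList t as_ ae fuel sf).map Prod.snd) := by
  induction fuel generalizing sf with
  | zero => simp [pvSpansB, pvSpansList]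
  | succ n ih =>
    simp only [pvSpansB, pvSpansList]
    split
    · simp
    · rw [ih]; simp

lemma pvFindFrom_gt_len (s sub : List Char) (k : Int) (h0 : 0 ≤ k) (h : (s.length : Int) < k) :
    PySem.Chars.findFrom s sub k = -1 := by
  simp only [PySem.Chars.findFrom]
  split_ifs <;> omega

lemma pvFindFrom_bounds (s sub : List Char) (k : Int) (hsub : sub ≠ []) (h0 : 0 ≤ k)
    (h : PySem.Chars.findFrom s sub k ≠ -1) :
    k ≤ PySem.Chars.findFrom s sub k ∧
      (PySem.Chars.findFrom s sub k) + (sub.length : Int) ≤ (s.length : Int) := by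
  by_cases hk : (s.length : Int) < k
  · exact absurd (pvFindFrom_gt_len s sub k h0 hk) h
  · have hk2 : k.toNat ≤ s.length := by omega
    have hkk : (k.toNat : Int) = k := by omega
    obtain ⟨h1, h2, _⟩ := PySem.Chars.findFrom_natCast_spec s sub k.toNat hk2 (by rw [hkk]; exact h)
    rw [hkk] at h1 h2
    refine ⟨h1, ?_⟩
    have hlen := h2.length_le
    have hs1 : 0 < sub.length := List.length_pos_of_ne_nil hsub
    rw [List.length_drop] at hlen
    omega

lemma pvGoodFrom_mono {lo lo' : Int} (h : lo' ≤ lo) {l : List (Int × Int)} (hg : pvGoodFrom lo l) :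
    pvGoodFrom lo' l := by
  cases l with
  | nil => trivial
  | cons p rest => obtain ⟨a, b, c⟩ := hg; exact ⟨by omega, b, c⟩

lemma pvSpansList_good (t as_ ae : List Char) (has : as_ ≠ []) (hae : ae ≠ [])
    (fuel : Nat) (sf : Int) (h0 : 0 ≤ sf) :
    pvGoodFrom sf (pvSpansList t as_ ae fuel sf) := by
  induction fuel generalizing sf with
  | zero => simp [pvSpansList, pvGoodFrom]
  | succ n ih =>
    simp only [pvSpansList]
    by_cases hsi : PySem.Chars.findFrom t as_ sf = -1
    · simp [hsi, pvGoodFrom]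
    · rw [if_neg hsi]
      obtain ⟨hb1, hb2⟩ := pvFindFrom_bounds t as_ sf has h0 hsi
      have hcs0 : (0:Int) ≤ PySem.Chars.findFrom t as_ sf + (as_.length : Int) := by omega
      have hcse : PySem.Chars.findFrom t as_ sf + (as_.length : Int) ≤
          (if PySem.Chars.findFrom t ae (PySem.Chars.findFrom t as_ sf + (as_.length : Int)) = -1
           then (t.length : Int)
           else PySem.Chars.findFrom t ae (PySem.Chars.findFrom t as_ sf + (as_.length : Int))) := by
        by_cases he0 : PySem.Chars.findFrom t ae (PySem.Chars.findFrom t as_ sf + (as_.length : Int)) = -1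
        · rw [if_pos he0]; omega
        · rw [if_neg he0]
          exact (pvFindFrom_bounds t ae _ hae hcs0 he0).1
      have hae1 : 0 < ae.length := List.length_pos_of_ne_nil hae
      refine ⟨by omega, hcse, ?_⟩
      exact pvGoodFrom_mono (by omega) (ih _ (by omega))

lemma pvScanA_eq_any (spans : List (Int × Int)) (s e : Int) :
    pvScanA spans s e = if (∃ p ∈ spans, p.1 ≤ s ∧ e ≤ p.2) then 1 else 0 := by
  induction spans with
  | nil => simp [pvScanA]
  | cons p rest ih =>
    obtain ⟨ps, pe⟩ := p
    simp only [pvScanA, ih]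
    by_cases h : s ≥ ps ∧ e ≤ pe
    · rw [if_pos h, if_pos ⟨(ps, pe), by simp, h.1, h.2⟩]
    · rw [if_neg h]
      by_cases h2 : ∃ p ∈ rest, p.1 ≤ s ∧ e ≤ p.2
      · rw [if_pos h2, if_pos (by obtain ⟨q, hq, hh⟩ := h2; exact ⟨q, by simp [hq], hh⟩)]
      · rw [if_neg h2, if_neg ?_]
        rintro ⟨q, hq, hh⟩
        simp only [List.mem_cons] at hq
        rcases hq with hq | hq
        · exact h (by cases hq; exact ⟨hh.1, hh.2⟩)
        · exact h2 ⟨q, hq, hh⟩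

lemma pvGoodFrom_pairwise {lo : Int} {l : List (Int × Int)} (hg : pvGoodFrom lo l) :
    List.Pairwise (fun p q => p.2 < q.1) l ∧ ∀ p ∈ l, lo ≤ p.1 ∧ p.1 ≤ p.2 := by
  induction l generalizing lo with
  | nil => simp
  | cons p rest ih =>
    obtain ⟨ps, pe⟩ := p
    obtain ⟨h1, h2, h3⟩ := hg
    obtain ⟨pw, hmem⟩ := ih h3
    refine ⟨List.Pairwise.cons (fun q hq => ?_) pw, ?_⟩
    · have := (hmem q hq).1; simpa using by omega
    · rintro q hq
      rcases List.mem_cons.mp hq with rfl | hq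
      · exact ⟨h1, h2⟩
      · have := hmem q hq; exact ⟨by omega, this.2⟩

lemma pvScan_eq_bisect (spans : List (Int × Int)) (hg : pvGoodFrom 0 spans) (s e : Int) :
    pvScanA spans s e =
      (if 1 ≤ PySem.List.bisectRight (spans.map Prod.fst) s ∧
          e ≤ (spans.map Prod.snd).getD (PySem.List.bisectRight (spans.map Prod.fst) s - 1) 0
        then 1 else 0) := by
  obtain ⟨hpw, hmem⟩ := pvGoodFrom_pairwise hg
  have sorted : List.Pairwise (fun a b => a ≤ b) (spans.map Prod.fst) := by
    rw [List.pairwise_map]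
    exact hpw.imp_of_mem (fun {p q} hp hq h => by have := (hmem p hp).2; omega)
  obtain ⟨hjle, hltj, hgej⟩ := PySem.List.bisectRight_spec (spans.map Prod.fst) s sorted
  set j := PySem.List.bisectRight (spans.map Prod.fst) s with hj
  rw [pvScanA_eq_any]
  refine if_congr ?_ rfl rfl
  have hlenf : (spans.map Prod.fst).length = spans.length := by simp
  have hlens : (spans.map Prod.snd).length = spans.length := by simp
  constructor
  · rintro ⟨p, hp, hps, hpe⟩
    obtain ⟨i, hi, rfl⟩ := List.mem_iff_getElem.mp hp
    have hij : i < j := by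
      by_contra hc
      have := hgej i (by omega) (by omega)
      simp at this
      omega
    have hj1 : 1 ≤ j := by omega
    refine ⟨hj1, ?_⟩
    rw [List.getD_eq_getElem _ _ (by omega)]
    have hsnd : (spans.map Prod.snd)[j-1]'(by omega) = (spans[j-1]'(by omega)).2 := by simp
    rw [hsnd]
    rcases Nat.lt_or_ge i (j-1) with hlt | hge
    · have := List.pairwise_iff_getElem.mp hpw i (j-1) (by omega) (by omega) (by omega)
      have h2 := (hmem (spans[j-1]'(by omega)) (List.getElem_mem _)).2
      omega
    · have : i = j - 1 := by omega
      subst this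
      omega
  · rintro ⟨hj1, he⟩
    refine ⟨spans[j-1]'(by omega), List.getElem_mem _, ?_, ?_⟩
    · have := hltj (j-1) (by omega) (by omega)
      simpa using this
    · rw [List.getD_eq_getElem _ _ (by omega)] at he
      simpa using he

lemma pvPortA_eq (text : String) (offsets : List (List Int)) (assistant_start assistant_end : String) :
    assistant_only_mask_from_offsets_py text offsets assistant_start assistant_end =
      (if assistant_start = "" ∨ assistant_end = "" then List.replicate offsets.length 0
       else if pvSpansList text.toList assistant_start.toList assistant_end.toList
           (text.toList.length + 2) 0 = [] then List.replicate offsets.length 0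
       else offsets.map (pvRowA (pvSpansList text.toList assistant_start.toList assistant_end.toList
           (text.toList.length + 2) 0))) := by
  simp only [assistant_only_mask_from_offsets_py, pvSpansA_eq, List.nil_append]

lemma pvPortB_eq (text : String) (offsets : List (List Int)) (assistant_start assistant_end : String) :
    assistant_only_mask_from_offsets_py_alt text offsets assistant_start assistant_end =
      (if assistant_start = "" ∨ assistant_end = "" then List.replicate offsets.length 0
       else if (pvSpansList text.toList assistant_start.toList assistant_end.toList
           (text.toList.length + 2) 0).map Prod.fst = [] then List.replicate offsets.length 0
       else offsets.map (pvRowB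
           ((pvSpansList text.toList assistant_start.toList assistant_end.toList
               (text.toList.length + 2) 0).map Prod.fst)
           ((pvSpansList text.toList assistant_start.toList assistant_end.toList
               (text.toList.length + 2) 0).map Prod.snd))) := by
  simp only [assistant_only_mask_from_offsets_py_alt, pvSpansB_eq]

-- ===== VERDICT (by name: the statement is the Claim_ definition above) =====
theorem assistant_only_mask_from_offsets_py_spec : Claim_equal_assistant_only_mask_from_offsets_py := by
  intro text offsets assistant_start assistant_end _hdom _hpre
  unfold Spec_assistant_only_mask_from_offsets_py
  rw [pvPortA_eq, pvPortB_eq]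
  by_cases h1 : assistant_start = "" ∨ assistant_end = ""
  · rw [if_pos h1, if_pos h1]
  · rw [if_neg h1, if_neg h1]
    have has' : assistant_start.toList ≠ [] := by
      intro h
      exact h1 (Or.inl (by rwa [← String.toList_eq_nil_iff]))
    have hae' : assistant_end.toList ≠ [] := by
      intro h
      exact h1 (Or.inr (by rwa [← String.toList_eq_nil_iff]))
    have hg : pvGoodFrom 0 (pvSpansList text.toList assistant_start.toList assistant_end.toList
        (text.toList.length + 2) 0) :=
      pvSpansList_good _ _ _ has' hae' _ 0 le_rfl
    by_cases h2 : pvSpansList text.toList assistant_start.toList assistant_end.toList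
        (text.toList.length + 2) 0 = []
    · rw [if_pos h2, if_pos (by exact List.map_eq_nil_iff.mpr h2)]
    · rw [if_neg h2, if_neg (by exact fun h => h2 (List.map_eq_nil_iff.mp h))]
      apply List.map_congr_left
      intro o _ho
      match o with
      | [] => rfl
      | [_] => rfl
      | _ :: _ :: _ :: _ => rfl
      | [st, en] =>
        show (if st = en then 0 else pvScanA _ st en) = _
        
        by_cases hse : st = en
        · rw [if_pos hse]
          show (0 : Int) = if st ≠ en ∧ _ then 1 else 0
          rw [if_neg (by simp [hse])]
        · rw [if_neg hse, pvScan_eq_bisect _ hg st en]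
          show _ = if st ≠ en ∧ _ then 1 else 0
          rw [if_congr (Iff.symm (and_iff_right hse)) rfl rfl]
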